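-- pv_equiv track=rewrite | github.com/AshirwadPradhan/yasmss | yasmss/parsetemplate/parser.py | _getWhereRval
-- ===== SOURCE A (Python) =====
-- def _getWhereRval(tmpQuery):
--     wRval = ""
--     tmpQuery = tmpQuery[::-1]
--     for c in tmpQuery:
--         if c.isalnum() or c.isspace():
--             wRval = wRval + c
--         else:
--             break
--     wRval = wRval[::-1].strip()
--     return wRval
-- ===== SOURCE B (Python) =====
-- def _getWhereRval(tmpQuery):
--     # single forward pass: slice off everything up to (and including) the
--     # last character that is neither alphanumeric nor whitespace
--     b = 0
--     for j, c in enumerate(tmpQuery):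
--         if not (c.isalnum() or c.isspace()):
--             b = j + 1
--     return tmpQuery[b:].strip()
-- ===== Notes on version B (the rewrite author's own statement) =====
-- stated objective: simpler
-- what changed: Replaced the reverse-then-accumulate-then-reverse suffix scan by a single forward pass that records the index after the last non-(alnum/space) character and slices from there, eliminating both string reversals and the quadratic string accumulator.
import Mathlib
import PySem

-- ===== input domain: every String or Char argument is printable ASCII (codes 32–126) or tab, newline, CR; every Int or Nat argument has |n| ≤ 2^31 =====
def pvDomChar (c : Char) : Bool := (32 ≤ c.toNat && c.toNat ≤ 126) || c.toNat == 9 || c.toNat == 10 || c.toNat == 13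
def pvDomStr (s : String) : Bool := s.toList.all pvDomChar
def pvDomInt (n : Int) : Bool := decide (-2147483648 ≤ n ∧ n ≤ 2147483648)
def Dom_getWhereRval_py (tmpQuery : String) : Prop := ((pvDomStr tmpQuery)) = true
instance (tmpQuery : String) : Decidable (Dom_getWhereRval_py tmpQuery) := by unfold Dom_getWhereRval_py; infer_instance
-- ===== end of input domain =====

-- B replaces A's reverse/accumulate/reverse suffix scan with one forward pass computing the
-- slice boundary; objective: simpler (no reversals, no accumulator).

-- ===== PORT A =====
def pvGoodChar (c : Char) : Bool := PySem.Chars.isalnum c || PySem.Chars.isspace c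

-- the for-loop of A over the reversed string, accumulating wRval (break on a bad char)
def pvLoopA : List Char → List Char → List Char
  | [], wRval => wRval
  | c :: rest, wRval =>
      if pvGoodChar c then pvLoopA rest (wRval ++ [c]) else wRval

def getWhereRval_py (tmpQuery : String) : String :=
  let rev := (PySem.List.slice? tmpQuery.toList none none (-1)).getD []   -- tmpQuery[::-1]
  let wRval := pvLoopA rev []
  PySem.Str.strip (String.ofList ((PySem.List.slice? wRval none none (-1)).getD []))  -- wRval[::-1].strip()

-- ===== PORT B =====
def getWhereRval_py_alt (tmpQuery : String) : String :=
  let b : Int := (PySem.List.enumerate tmpQuery.toList 0).foldl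
      (fun b p => if !(pvGoodChar p.2) then p.1 + 1 else b) 0
  PySem.Str.strip (PySem.Str.slice tmpQuery (some b) none)

-- ===== PRECONDITION & SPEC =====
def Spec_getWhereRval_py (tmpQuery : String) (out : String) : Prop := out = getWhereRval_py_alt tmpQuery
instance (tmpQuery : String) (out : String) : Decidable (Spec_getWhereRval_py tmpQuery out) := by unfold Spec_getWhereRval_py; infer_instance

-- ===== CLAIM (what is proved, stated in full; the proofs are below) =====
def Claim_equal_getWhereRval_py : Prop := ∀ (tmpQuery : String), Dom_getWhereRval_py tmpQuery → Spec_getWhereRval_py tmpQuery (getWhereRval_py tmpQuery)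

-- ===== LEMMAS AND PROOFS =====

theorem pvLoopA_eq_takeWhile (l acc : List Char) :
    pvLoopA l acc = acc ++ l.takeWhile pvGoodChar := by
  induction l generalizing acc with
  | nil => simp [pvLoopA]
  | cons c rest ih =>
      simp only [pvLoopA, List.takeWhile]
      by_cases h : pvGoodChar c <;> simp [h, ih]

-- the B fold equals a Nat boundary b ≤ l.length, and dropping b yields A's good suffix
theorem pvFoldB_spec (l : List Char) :
    ∃ b : Nat, b ≤ l.length ∧
      (PySem.List.enumerate l 0).foldl
        (fun b p => if !(pvGoodChar p.2) then p.1 + 1 else b) 0 = (b : Int) ∧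
      l.drop b = (l.reverse.takeWhile pvGoodChar).reverse := by
  induction l using List.reverseRecOn with
  | nil => exact ⟨0, by simp⟩
  | append_singleton l c ih =>
      obtain ⟨b, hb, hfold, hdrop⟩ := ih
      rw [PySem.List.enumerate_append, List.foldl_append, hfold]
      by_cases h : pvGoodChar c
      · refine ⟨b, by simpa using Nat.le_succ_of_le hb, ?_, ?_⟩
        · simp [PySem.List.enumerate_cons, PySem.List.enumerate_nil, h]
        · rw [List.drop_append_of_le_length hb, hdrop]
          simp [h]
      · refine ⟨l.length + 1, by simp, ?_, ?_⟩
        · simp only [PySem.List.enumerate_cons, PySem.List.enumerate_nil, List.foldl_cons,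
            List.foldl_nil, h, Bool.not_false, if_pos]
          push_cast; ring
        · rw [List.drop_eq_nil_of_le (by simp)]
          simp [h]

-- ===== VERDICT (by name: the statement is the Claim_ definition above) =====
theorem getWhereRval_py_spec : Claim_equal_getWhereRval_py := by
  intro s _
  show getWhereRval_py s = getWhereRval_py_alt s
  unfold getWhereRval_py getWhereRval_py_alt
  obtain ⟨b, hb, hfold, hdrop⟩ := pvFoldB_spec s.toList
  rw [hfold]
  simp only [PySem.List.slice?_none_none_neg_one, Option.getD_some]
  congr 1
  apply String.ext
  rw [pvLoopA_eq_takeWhile]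
  simp only [List.nil_append, String.toList_ofList, PySem.Str.toList_slice,
    PySem.Chars.slice_eq_listSlice, PySem.List.slice_from_natCast]
  exact hdrop.symm
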